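-- pv_equiv track=rewrite | github.com/Sudipta1215/SummariserAI | backend/app/services/sarvam_service.py | get_best_voice
-- ===== SOURCE A (Python) =====
-- def get_best_voice(lang_code: str) -> str:
--     lang = (lang_code or "").lower()
--     if any(x in lang for x in ["ta-in", "te-in", "kn-in", "ml-in"]):
--         return "vidya"
--     if "pa-in" in lang:
--         return "hitesh"
--     if "mr-in" in lang or "gu-in" in lang:
--         return "arya"
--     if any(x in lang for x in ["hi-in", "bn-in", "od-in"]):
--         return "anushka"
--     if "en-in" in lang:
--         return "karun"
--     return "karun"
-- ===== SOURCE B (Python) =====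
-- _CODE_PRIORITY = {"ta-in": 0, "te-in": 0, "kn-in": 0, "ml-in": 0,
--                   "pa-in": 1,
--                   "mr-in": 2, "gu-in": 2,
--                   "hi-in": 3, "bn-in": 3, "od-in": 3,
--                   "en-in": 4}
-- _VOICES = ["vidya", "hitesh", "arya", "anushka", "karun", "karun"]  # priority 5 = no code found
--
--
-- def get_best_voice(lang_code: str) -> str:
--     # Single left-to-right sweep: classify each 5-char window by one dict
--     # lookup and keep the best (smallest) priority seen.
--     lang = (lang_code or "").lower()
--     best = 5
--     rest = lang
--     while rest:
--         p = _CODE_PRIORITY.get(rest[:5], 5)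
--         if p < best:
--             best = p
--         rest = rest[1:]
--     return _VOICES[best]
-- ===== Notes on version B (the rewrite author's own statement) =====
-- stated objective: alternative
-- what changed: Instead of A's priority if/else chain running eleven separate whole-string substring searches, B makes one left-to-right sweep over the lowered string, classifying each 5-character window by a single dict lookup and keeping the minimum priority seen, then indexes a voice table with that minimum.
import Mathlib
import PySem

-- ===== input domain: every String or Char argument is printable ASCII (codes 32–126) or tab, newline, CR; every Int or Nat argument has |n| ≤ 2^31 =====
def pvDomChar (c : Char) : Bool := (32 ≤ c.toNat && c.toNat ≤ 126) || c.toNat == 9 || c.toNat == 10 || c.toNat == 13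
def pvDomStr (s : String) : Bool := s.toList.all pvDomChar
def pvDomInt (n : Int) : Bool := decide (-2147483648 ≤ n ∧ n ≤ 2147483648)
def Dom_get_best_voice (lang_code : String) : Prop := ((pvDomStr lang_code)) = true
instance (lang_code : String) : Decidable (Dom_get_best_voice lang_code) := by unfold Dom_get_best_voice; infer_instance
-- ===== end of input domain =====

-- B replaces A's priority if/else chain of eleven whole-string substring searches by a single
-- left-to-right sweep that classifies each 5-char window with one dict lookup and keeps the
-- minimum priority seen (alternative decomposition, same cost).

-- ===== PORT A =====
def get_best_voice (lang_code : String) : String :=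
  let lang := PySem.Str.lower lang_code   -- (lang_code or "").lower(): 'or ""' is the identity on strings
  if ["ta-in", "te-in", "kn-in", "ml-in"].any (fun x => PySem.Str.isIn x lang) then "vidya"
  else if PySem.Str.isIn "pa-in" lang then "hitesh"
  else if PySem.Str.isIn "mr-in" lang || PySem.Str.isIn "gu-in" lang then "arya"
  else if ["hi-in", "bn-in", "od-in"].any (fun x => PySem.Str.isIn x lang) then "anushka"
  else if PySem.Str.isIn "en-in" lang then "karun"
  else "karun"

-- ===== PORT B =====
def pvCodePriority : PySem.Dict (List Char) Nat :=
  PySem.Dict.mk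
  [("ta-in".toList, 0), ("te-in".toList, 0), ("kn-in".toList, 0), ("ml-in".toList, 0),
   ("pa-in".toList, 1),
   ("mr-in".toList, 2), ("gu-in".toList, 2),
   ("hi-in".toList, 3), ("bn-in".toList, 3), ("od-in".toList, 3),
   ("en-in".toList, 4)]

def pvVoices : List String := ["vidya", "hitesh", "arya", "anushka", "karun", "karun"]

-- the 'while rest:' sweep of Source B: rest[:5] is take 5, rest = rest[1:] is the tail
def pvScan : List Char → Nat → Nat
  | [], best => best
  | c :: rest, best =>
      let p := PySem.Dict.getD pvCodePriority ((c :: rest).take 5) 5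
      pvScan rest (if p < best then p else best)

def get_best_voice_alt (lang_code : String) : String :=
  let lang := (PySem.Str.lower lang_code).toList
  pvVoices.getD (pvScan lang 5) "karun"   -- _VOICES[best]: best ≤ 5, always in range

-- ===== PRECONDITION & SPEC =====
def Spec_get_best_voice (lang_code : String) (out : String) : Prop := out = get_best_voice_alt lang_code
instance (lang_code : String) (out : String) : Decidable (Spec_get_best_voice lang_code out) := by unfold Spec_get_best_voice; infer_instance

-- ===== CLAIM (what is proved, stated in full; the proofs are below) =====
def Claim_equal_get_best_voice : Prop := ∀ (lang_code : String), Dom_get_best_voice lang_code → Spec_get_best_voice lang_code (get_best_voice lang_code)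

-- ===== LEMMAS AND PROOFS =====

-- priority of the 5-char window at the head of a suffix (what one loop step of B looks up)
def pvPrio (t : List Char) : Nat := PySem.Dict.getD pvCodePriority (t.take 5) 5

-- minimum window priority over all suffixes (the quantity B's sweep computes)
def pvMinList : List Char → Nat
  | [] => 5
  | c :: r => min (pvPrio (c :: r)) (pvMinList r)

lemma getD_eq_or {κ ν : Type} [BEq κ] [LawfulBEq κ] (d : PySem.Dict κ ν) (x : κ) (dflt : ν) :
    PySem.Dict.getD d x dflt = dflt ∨ (x, PySem.Dict.getD d x dflt) ∈ d.items := by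
  obtain ⟨l⟩ := d
  induction l with
  | nil => exact Or.inl rfl
  | cons p rest ih =>
    by_cases h : p.1 == x
    · right
      have hx : p.1 = x := by simpa using h
      simp [PySem.Dict.getD, PySem.Dict.get?, PySem.Dict.items, List.find?, h]
      left
      exact Prod.ext hx.symm rfl
    · have hred : PySem.Dict.getD (PySem.Dict.mk (p :: rest)) x dflt
          = PySem.Dict.getD (PySem.Dict.mk rest) x dflt := by
        simp [PySem.Dict.getD, PySem.Dict.get?, PySem.Dict.items, List.find?, h]
      rw [hred]
      rcases ih with h1 | h1
      · exact Or.inl h1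
      · exact Or.inr (List.mem_cons_of_mem _ h1)

lemma mem_pvCodePriority (c : List Char) (v : Nat) :
    (c, v) ∈ pvCodePriority.items ↔
      (c = "ta-in".toList ∧ v = 0) ∨ (c = "te-in".toList ∧ v = 0) ∨
      (c = "kn-in".toList ∧ v = 0) ∨ (c = "ml-in".toList ∧ v = 0) ∨
      (c = "pa-in".toList ∧ v = 1) ∨
      (c = "mr-in".toList ∧ v = 2) ∨ (c = "gu-in".toList ∧ v = 2) ∨
      (c = "hi-in".toList ∧ v = 3) ∨ (c = "bn-in".toList ∧ v = 3) ∨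
      (c = "od-in".toList ∧ v = 3) ∨ (c = "en-in".toList ∧ v = 4) := by
  simp [pvCodePriority]

lemma pvPrio_le (t : List Char) : pvPrio t ≤ 5 := by
  show PySem.Dict.getD pvCodePriority (t.take 5) 5 ≤ 5
  rcases getD_eq_or pvCodePriority (t.take 5) 5 with h | h
  · omega
  · rw [mem_pvCodePriority] at h
    rcases h with ⟨_, h⟩|⟨_, h⟩|⟨_, h⟩|⟨_, h⟩|⟨_, h⟩|⟨_, h⟩|⟨_, h⟩|⟨_, h⟩|⟨_, h⟩|⟨_, h⟩|⟨_, h⟩ <;> omega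

lemma pvMinList_le (s : List Char) : pvMinList s ≤ 5 := by
  induction s with
  | nil => simp [pvMinList]
  | cons c r ih => simp only [pvMinList]; have := pvPrio_le (c :: r); omega

lemma pvScan_min (l : List Char) : ∀ b : Nat, b ≤ 5 → pvScan l b = min b (pvMinList l) := by
  induction l with
  | nil => intro b hb; simp [pvScan, pvMinList]; omega
  | cons c r ih =>
    intro b hb
    have hp := pvPrio_le (c :: r)
    have hstep : pvScan (c :: r) b
        = pvScan r (if pvPrio (c :: r) < b then pvPrio (c :: r) else b) := by
      simp only [pvScan, pvPrio]
    rw [hstep, ih _ (by split_ifs <;> omega)]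
    simp only [pvMinList]
    simp only [Nat.min_def]
    split_ifs <;> omega

lemma pvMinList_le_iff (s : List Char) (k : Nat) :
    pvMinList s ≤ k ↔ ∃ t, t <:+ s ∧ pvPrio t ≤ k := by
  induction s with
  | nil =>
    have h0 : pvPrio ([] : List Char) = 5 := rfl
    simp [pvMinList, List.suffix_nil, h0]
  | cons c r ih =>
    simp only [pvMinList]
    rw [min_le_iff, ih]
    constructor
    · rintro (h | ⟨t, ht, hp⟩)
      · exact ⟨c :: r, List.suffix_refl _, h⟩
      · exact ⟨t, ht.trans (List.suffix_cons c r), hp⟩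
    · rintro ⟨t, ht, hp⟩
      rcases List.suffix_cons_iff.mp ht with rfl | ht'
      · exact Or.inl hp
      · exact Or.inr ⟨t, ht', hp⟩

lemma infix_minlist_le (c : List Char) (v : Nat) {s : List Char} (h5 : c.length = 5)
    (hv : PySem.Dict.getD pvCodePriority c 5 = v) (h : c <:+: s) : pvMinList s ≤ v := by
  obtain ⟨t, hpre, hsuf⟩ := List.infix_iff_prefix_suffix.mp h
  have he : t.take 5 = c := by
    have h' := List.prefix_iff_eq_take.mp hpre
    rw [h5] at h'
    exact h'.symm
  refine (pvMinList_le_iff s v).mpr ⟨t, hsuf, ?_⟩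
  unfold pvPrio
  rw [he, hv]

lemma minlist_le_exists {s : List Char} {k : Nat} (hk : k < 5) (h : pvMinList s ≤ k) :
    ∃ c v, (c, v) ∈ pvCodePriority.items ∧ v ≤ k ∧ c <:+: s := by
  obtain ⟨t, hsuf, hp⟩ := (pvMinList_le_iff s k).mp h
  rcases getD_eq_or pvCodePriority (t.take 5) 5 with h0 | hmem
  · exfalso; unfold pvPrio at hp; omega
  · exact ⟨t.take 5, pvPrio t, hmem, hp,
      List.infix_iff_prefix_suffix.mpr ⟨t, List.take_prefix 5 t, hsuf⟩⟩

lemma pvMinList_lb0 {s : List Char} (hta : ¬ ("ta-in".toList <:+: s)) (hte : ¬ ("te-in".toList <:+: s)) (hkn : ¬ ("kn-in".toList <:+: s)) (hml : ¬ ("ml-in".toList <:+: s)) :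
    ¬ pvMinList s ≤ 0 := by
  intro h
  obtain ⟨c, v, hmem, hv, hinf⟩ := minlist_le_exists (by omega) h
  rw [mem_pvCodePriority] at hmem
  rcases hmem with ⟨rfl, rfl⟩|⟨rfl, rfl⟩|⟨rfl, rfl⟩|⟨rfl, rfl⟩|⟨rfl, rfl⟩|⟨rfl, rfl⟩|⟨rfl, rfl⟩|⟨rfl, rfl⟩|⟨rfl, rfl⟩|⟨rfl, rfl⟩|⟨rfl, rfl⟩
  · exact hta hinf
  · exact hte hinf
  · exact hkn hinf
  · exact hml hinf
  · omega
  · omega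
  · omega
  · omega
  · omega
  · omega
  · omega

lemma pvMinList_lb1 {s : List Char} (hta : ¬ ("ta-in".toList <:+: s)) (hte : ¬ ("te-in".toList <:+: s)) (hkn : ¬ ("kn-in".toList <:+: s)) (hml : ¬ ("ml-in".toList <:+: s)) (hpa : ¬ ("pa-in".toList <:+: s)) :
    ¬ pvMinList s ≤ 1 := by
  intro h
  obtain ⟨c, v, hmem, hv, hinf⟩ := minlist_le_exists (by omega) h
  rw [mem_pvCodePriority] at hmem
  rcases hmem with ⟨rfl, rfl⟩|⟨rfl, rfl⟩|⟨rfl, rfl⟩|⟨rfl, rfl⟩|⟨rfl, rfl⟩|⟨rfl, rfl⟩|⟨rfl, rfl⟩|⟨rfl, rfl⟩|⟨rfl, rfl⟩|⟨rfl, rfl⟩|⟨rfl, rfl⟩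
  · exact hta hinf
  · exact hte hinf
  · exact hkn hinf
  · exact hml hinf
  · exact hpa hinf
  · omega
  · omega
  · omega
  · omega
  · omega
  · omega

lemma pvMinList_lb2 {s : List Char} (hta : ¬ ("ta-in".toList <:+: s)) (hte : ¬ ("te-in".toList <:+: s)) (hkn : ¬ ("kn-in".toList <:+: s)) (hml : ¬ ("ml-in".toList <:+: s)) (hpa : ¬ ("pa-in".toList <:+: s)) (hmr : ¬ ("mr-in".toList <:+: s)) (hgu : ¬ ("gu-in".toList <:+: s)) :
    ¬ pvMinList s ≤ 2 := by
  intro h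
  obtain ⟨c, v, hmem, hv, hinf⟩ := minlist_le_exists (by omega) h
  rw [mem_pvCodePriority] at hmem
  rcases hmem with ⟨rfl, rfl⟩|⟨rfl, rfl⟩|⟨rfl, rfl⟩|⟨rfl, rfl⟩|⟨rfl, rfl⟩|⟨rfl, rfl⟩|⟨rfl, rfl⟩|⟨rfl, rfl⟩|⟨rfl, rfl⟩|⟨rfl, rfl⟩|⟨rfl, rfl⟩
  · exact hta hinf
  · exact hte hinf
  · exact hkn hinf
  · exact hml hinf
  · exact hpa hinf
  · exact hmr hinf
  · exact hgu hinf
  · omega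
  · omega
  · omega
  · omega

lemma pvMinList_lb3 {s : List Char} (hta : ¬ ("ta-in".toList <:+: s)) (hte : ¬ ("te-in".toList <:+: s)) (hkn : ¬ ("kn-in".toList <:+: s)) (hml : ¬ ("ml-in".toList <:+: s)) (hpa : ¬ ("pa-in".toList <:+: s)) (hmr : ¬ ("mr-in".toList <:+: s)) (hgu : ¬ ("gu-in".toList <:+: s)) (hhi : ¬ ("hi-in".toList <:+: s)) (hbn : ¬ ("bn-in".toList <:+: s)) (hod : ¬ ("od-in".toList <:+: s)) :
    ¬ pvMinList s ≤ 3 := by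
  intro h
  obtain ⟨c, v, hmem, hv, hinf⟩ := minlist_le_exists (by omega) h
  rw [mem_pvCodePriority] at hmem
  rcases hmem with ⟨rfl, rfl⟩|⟨rfl, rfl⟩|⟨rfl, rfl⟩|⟨rfl, rfl⟩|⟨rfl, rfl⟩|⟨rfl, rfl⟩|⟨rfl, rfl⟩|⟨rfl, rfl⟩|⟨rfl, rfl⟩|⟨rfl, rfl⟩|⟨rfl, rfl⟩
  · exact hta hinf
  · exact hte hinf
  · exact hkn hinf
  · exact hml hinf
  · exact hpa hinf
  · exact hmr hinf
  · exact hgu hinf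
  · exact hhi hinf
  · exact hbn hinf
  · exact hod hinf
  · omega

lemma pvMinList_lb4 {s : List Char} (hta : ¬ ("ta-in".toList <:+: s)) (hte : ¬ ("te-in".toList <:+: s)) (hkn : ¬ ("kn-in".toList <:+: s)) (hml : ¬ ("ml-in".toList <:+: s)) (hpa : ¬ ("pa-in".toList <:+: s)) (hmr : ¬ ("mr-in".toList <:+: s)) (hgu : ¬ ("gu-in".toList <:+: s)) (hhi : ¬ ("hi-in".toList <:+: s)) (hbn : ¬ ("bn-in".toList <:+: s)) (hod : ¬ ("od-in".toList <:+: s)) (hen : ¬ ("en-in".toList <:+: s)) :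
    ¬ pvMinList s ≤ 4 := by
  intro h
  obtain ⟨c, v, hmem, hv, hinf⟩ := minlist_le_exists (by omega) h
  rw [mem_pvCodePriority] at hmem
  rcases hmem with ⟨rfl, rfl⟩|⟨rfl, rfl⟩|⟨rfl, rfl⟩|⟨rfl, rfl⟩|⟨rfl, rfl⟩|⟨rfl, rfl⟩|⟨rfl, rfl⟩|⟨rfl, rfl⟩|⟨rfl, rfl⟩|⟨rfl, rfl⟩|⟨rfl, rfl⟩
  · exact hta hinf
  · exact hte hinf
  · exact hkn hinf
  · exact hml hinf
  · exact hpa hinf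
  · exact hmr hinf
  · exact hgu hinf
  · exact hhi hinf
  · exact hbn hinf
  · exact hod hinf
  · exact hen hinf

-- ===== VERDICT (by name: the statement is the Claim_ definition above) =====
set_option maxHeartbeats 1000000 in
theorem get_best_voice_spec : Claim_equal_get_best_voice := by
  intro lc _
  unfold Spec_get_best_voice
  have hminle := pvMinList_le ((PySem.Str.lower lc).toList)
  have halt : get_best_voice_alt lc
      = pvVoices.getD (pvMinList ((PySem.Str.lower lc).toList)) "karun" := by
    show pvVoices.getD (pvScan ((PySem.Str.lower lc).toList) 5) "karun" = _
    rw [pvScan_min _ 5 (by omega), min_eq_right hminle]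
  rw [halt]
  simp only [get_best_voice]
  split_ifs with h0 h1 h2 h3 h4
  · simp only [List.any_cons, List.any_nil, Bool.or_false, Bool.or_eq_true,
      PySem.Str.isIn_iff_infix] at h0
    have hle : pvMinList ((PySem.Str.lower lc).toList) ≤ 0 := by
      rcases h0 with h|h|h|h <;> exact infix_minlist_le _ 0 (by rfl) (by rfl) h
    have hx : pvMinList ((PySem.Str.lower lc).toList) = 0 := by omega
    rw [hx]; rfl
  · simp only [List.any_cons, List.any_nil, Bool.or_false, Bool.or_eq_true,
      PySem.Str.isIn_iff_infix] at h0 h1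
    push_neg at h0
    obtain ⟨hta, hte, hkn, hml⟩ := h0
    have hub : pvMinList ((PySem.Str.lower lc).toList) ≤ 1 := infix_minlist_le _ 1 (by rfl) (by rfl) h1
    have hlb := pvMinList_lb0 hta hte hkn hml
    have hx : pvMinList ((PySem.Str.lower lc).toList) = 1 := by omega
    rw [hx]; rfl
  · simp only [List.any_cons, List.any_nil, Bool.or_false, Bool.or_eq_true,
      PySem.Str.isIn_iff_infix] at h0 h1 h2
    push_neg at h0
    obtain ⟨hta, hte, hkn, hml⟩ := h0
    have hub : pvMinList ((PySem.Str.lower lc).toList) ≤ 2 := by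
      rcases h2 with h|h <;> exact infix_minlist_le _ 2 (by rfl) (by rfl) h
    have hlb := pvMinList_lb1 hta hte hkn hml h1
    have hx : pvMinList ((PySem.Str.lower lc).toList) = 2 := by omega
    rw [hx]; rfl
  · simp only [List.any_cons, List.any_nil, Bool.or_false, Bool.or_eq_true,
      PySem.Str.isIn_iff_infix] at h0 h1 h2 h3
    push_neg at h0 h2
    obtain ⟨hta, hte, hkn, hml⟩ := h0
    obtain ⟨hmr, hgu⟩ := h2
    have hub : pvMinList ((PySem.Str.lower lc).toList) ≤ 3 := by
      rcases h3 with h|h|h <;> exact infix_minlist_le _ 3 (by rfl) (by rfl) h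
    have hlb := pvMinList_lb2 hta hte hkn hml h1 hmr hgu
    have hx : pvMinList ((PySem.Str.lower lc).toList) = 3 := by omega
    rw [hx]; rfl
  · simp only [List.any_cons, List.any_nil, Bool.or_false, Bool.or_eq_true,
      PySem.Str.isIn_iff_infix] at h0 h1 h2 h3 h4
    push_neg at h0 h2 h3
    obtain ⟨hta, hte, hkn, hml⟩ := h0
    obtain ⟨hmr, hgu⟩ := h2
    obtain ⟨hhi, hbn, hod⟩ := h3
    have hub : pvMinList ((PySem.Str.lower lc).toList) ≤ 4 := infix_minlist_le _ 4 (by rfl) (by rfl) h4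
    have hlb := pvMinList_lb3 hta hte hkn hml h1 hmr hgu hhi hbn hod
    have hx : pvMinList ((PySem.Str.lower lc).toList) = 4 := by omega
    rw [hx]; rfl
  · simp only [List.any_cons, List.any_nil, Bool.or_false, Bool.or_eq_true,
      PySem.Str.isIn_iff_infix] at h0 h1 h2 h3 h4
    push_neg at h0 h2 h3
    obtain ⟨hta, hte, hkn, hml⟩ := h0
    obtain ⟨hmr, hgu⟩ := h2
    obtain ⟨hhi, hbn, hod⟩ := h3
    have hlb := pvMinList_lb4 hta hte hkn hml h1 hmr hgu hhi hbn hod h4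
    have hx : pvMinList ((PySem.Str.lower lc).toList) = 5 := by omega
    rw [hx]; rfl
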